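-- pv_equiv track=rewrite | github.com/Yu-Maryland/RESPECT | Topological_Sorting_Transformer_Version/plots/experiment2_pipeline/plot2.py | remove_empty
-- ===== SOURCE A (Python) =====
-- def remove_empty(pipeline_node):
--     empty_idx = []
--     for i in range(len(pipeline_node)):
--         if len(pipeline_node[i]) <= 0:
--             empty_idx.append(i)
--
--     empty_idx.sort(reverse=True)
--     for idx in empty_idx:
--         pipeline_node.pop(idx)
--
--     return pipeline_node
-- ===== SOURCE B (Python) =====
-- def remove_empty(pipeline_node):
--     pipeline_node[:] = [x for x in pipeline_node if len(x) > 0]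
--     return pipeline_node
-- ===== Notes on version B (the rewrite author's own statement) =====
-- stated objective: simpler
-- what changed: Replaces A's two-phase collect-empty-indices / sort-descending / pop-by-index strategy with a single filtering pass written back in place via slice assignment (no index list, no sort, no element shifting).
import Mathlib
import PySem

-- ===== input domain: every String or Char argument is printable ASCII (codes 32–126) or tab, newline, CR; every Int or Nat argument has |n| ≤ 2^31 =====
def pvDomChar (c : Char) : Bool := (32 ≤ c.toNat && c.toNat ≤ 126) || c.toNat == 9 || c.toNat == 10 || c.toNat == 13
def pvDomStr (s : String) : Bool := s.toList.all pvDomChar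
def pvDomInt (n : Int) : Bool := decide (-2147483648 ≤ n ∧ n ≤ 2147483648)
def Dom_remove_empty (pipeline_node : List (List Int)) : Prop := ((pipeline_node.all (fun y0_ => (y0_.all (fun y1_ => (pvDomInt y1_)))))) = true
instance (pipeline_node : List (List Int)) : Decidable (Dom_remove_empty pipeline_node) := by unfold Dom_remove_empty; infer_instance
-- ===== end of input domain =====

-- B replaces A's collect-empty-indices / sort-descending / pop-by-index strategy by a single
-- filtering pass written back in place (slice assignment); equivalence here is about the return
-- value (both A and B mutate their argument in place in Python; both return the same object).

-- ===== PORT A =====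
-- pipeline_node.pop(idx), result discarded (pop? = none is unreachable here: every idx is in range)
def popA (st : List (List Int)) (idx : Int) : List (List Int) :=
  match PySem.List.pop? st idx with
  | some r => r.2
  | none => st

def remove_empty (pipeline_node : List (List Int)) : List (List Int) :=
  let empty_idx : List Int :=
    (PySem.List.pyRange 0 (PySem.List.len pipeline_node) 1).foldl
      (fun acc i =>
        if decide (PySem.List.len (PySem.List.pyGetD pipeline_node i []) ≤ 0) = true
        then acc ++ [i] else acc) []
  let empty_idx := PySem.List.sorted empty_idx (fun x => x) true
  empty_idx.foldl (fun st idx => popA st idx) pipeline_node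

-- ===== PORT B =====
def remove_empty_alt (pipeline_node : List (List Int)) : List (List Int) :=
  pipeline_node.filter (fun x => decide (0 < PySem.List.len x))

-- ===== PRECONDITION & SPEC =====
def Spec_remove_empty (pipeline_node : List (List Int)) (out : List (List Int)) : Prop := out = remove_empty_alt pipeline_node
instance (pipeline_node : List (List Int)) (out : List (List Int)) : Decidable (Spec_remove_empty pipeline_node out) := by unfold Spec_remove_empty; infer_instance

-- ===== CLAIM (what is proved, stated in full; the proofs are below) =====
def Claim_equal_remove_empty : Prop := ∀ (pipeline_node : List (List Int)), Dom_remove_empty pipeline_node → Spec_remove_empty pipeline_node (remove_empty pipeline_node)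

-- ===== LEMMAS AND PROOFS =====

-- popping a Nat index is List.eraseIdx (both leave the list unchanged out of range)
lemma popA_natCast (st : List (List Int)) (k : Nat) : popA st (k : Int) = st.eraseIdx k := by
  by_cases h : k < st.length
  · simp [popA, PySem.List.pop?_natCast st k h]
  · have hn : st.length ≤ k := Nat.le_of_not_lt h
    have h1 : PySem.List.pyIdx? st.length (k : Int) = none := by
      simp only [PySem.List.pyIdx?]
      split_ifs with h2 h3 <;> first | rfl | omega
    simp [popA, PySem.List.pop?, h1, List.eraseIdx_eq_self.mpr hn]

-- popping only indices ≥ 1 leaves the head in place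
lemma foldl_eraseIdx_map_succ (M : List Nat) (x : List Int) (xs : List (List Int)) :
    (M.map Nat.succ).foldl (fun st k => st.eraseIdx k) (x :: xs)
      = x :: M.foldl (fun st k => st.eraseIdx k) xs := by
  induction M generalizing xs with
  | nil => rfl
  | cons m M ih =>
    simp only [List.map_cons, List.foldl_cons, Nat.succ_eq_add_one, List.eraseIdx_cons_succ]
    exact ih _

-- the core fact: popping the empty positions back-to-front is filtering out the empty lists
lemma foldl_erase_empty (p : List (List Int)) :
    (((List.range p.length).filter (fun k => decide (PySem.List.len (p.getD k []) ≤ 0))).reverse).foldl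
        (fun st k => st.eraseIdx k) p
      = p.filter (fun x => decide (0 < PySem.List.len x)) := by
  induction p with
  | nil => rfl
  | cons x xs ih =>
    have hcomp : ((fun k => decide (PySem.List.len ((x :: xs).getD k []) ≤ 0)) ∘ Nat.succ)
        = (fun k => decide (PySem.List.len (xs.getD k []) ≤ 0)) := by
      funext k
      rw [Function.comp_apply, Nat.succ_eq_add_one, List.getD_cons_succ]
    rw [List.length_cons, List.range_succ_eq_map, List.filter_cons, List.filter_map, hcomp,
      List.getD_cons_zero, List.filter_cons]
    by_cases hx : PySem.List.len x ≤ 0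
    · have hx' : ¬ (0 < PySem.List.len x) := by
        simp only [PySem.List.len_eq] at hx ⊢; omega
      rw [if_pos (decide_eq_true hx), if_neg (by rw [decide_eq_false hx']; exact Bool.false_ne_true)]
      rw [List.reverse_cons, List.foldl_append, ← List.map_reverse, foldl_eraseIdx_map_succ, ih,
        List.foldl_cons, List.foldl_nil, List.eraseIdx_cons_zero]
    · have hx' : 0 < PySem.List.len x := by
        simp only [PySem.List.len_eq] at hx ⊢; omega
      rw [if_neg (by rw [decide_eq_false hx]; exact Bool.false_ne_true), if_pos (decide_eq_true hx')]
      rw [← List.map_reverse, foldl_eraseIdx_map_succ, ih]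

-- the descending sort of the (strictly increasing) index list is its reverse
lemma sorted_rev_indices (n : Nat) (Q : Nat → Bool) :
    PySem.List.sorted (List.map (fun k : Nat => (k : Int)) ((List.range n).filter Q)) (fun x => x) true
      = (List.map (fun k : Nat => (k : Int)) ((List.range n).filter Q)).reverse := by
  apply PySem.List.sorted_rev_eq_of_perm_of_pairwise_gt
  · exact List.reverse_perm _
  · rw [List.pairwise_reverse]
    refine List.Pairwise.map _ ?_ ((List.pairwise_lt_range).filter Q)
    intro a b h
    exact_mod_cast h

-- ===== VERDICT (by name: the statement is the Claim_ definition above) =====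
theorem remove_empty_spec : Claim_equal_remove_empty := by
  intro p _
  unfold Spec_remove_empty remove_empty remove_empty_alt
  dsimp only
  rw [PySem.List.foldl_append_if (f := fun i => i)]
  rw [List.nil_append, List.map_id', PySem.List.len_eq, PySem.List.pyRange_zero_natCast,
    List.filter_map]
  rw [sorted_rev_indices p.length
      ((fun i => decide (PySem.List.len (PySem.List.pyGetD p i []) ≤ 0)) ∘ fun k : Nat => (k : Int))]
  rw [← List.map_reverse, List.foldl_map]
  simp only [popA_natCast]
  have hpred : ((fun i => decide (PySem.List.len (PySem.List.pyGetD p i []) ≤ 0)) ∘ fun k : Nat => (k : Int))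
      = (fun k => decide (PySem.List.len (p.getD k []) ≤ 0)) := by
    funext k
    rw [Function.comp_apply, PySem.List.pyGetD_natCast]
  rw [hpred]
  exact foldl_erase_empty p
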